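-- pv_equiv track=rewrite | github.com/jakubmroczek/codeforces | 1399/a.py | solve
-- ===== SOURCE A (Python) =====
-- def _sort(array):
--     array.sort();
--
-- def solve(array):
--     '''
--         Returns True if an array can be reduced to a single element following
--         the 1399A task or False otherwise.
--     '''
--     if len(array) == 1:
--         return True
--
--     _sort(array)
--
--     for index in range(0, len(array) - 1):
--         left, right = array[index], array[index + 1]
--         if abs(left - right) > 1:
--             return False
--
--     return True
-- ===== SOURCE B (Python) =====
-- def solve(array):
--     '''
--         Returns True if an array can be reduced to a single element following
--         the 1399A task or False otherwise.
--     '''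
--     if not array:
--         return True
--     values = set(array)
--     return len(values) == max(values) - min(values) + 1
-- ===== Notes on version B (the rewrite author's own statement) =====
-- stated objective: alternative
-- what changed: Replaces sort-then-adjacent-gap scan with a single pass that builds the set of values: gapless iff the number of distinct values equals max-min+1 (A also sorts the list in place; B does not mutate its argument).
import Mathlib
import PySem

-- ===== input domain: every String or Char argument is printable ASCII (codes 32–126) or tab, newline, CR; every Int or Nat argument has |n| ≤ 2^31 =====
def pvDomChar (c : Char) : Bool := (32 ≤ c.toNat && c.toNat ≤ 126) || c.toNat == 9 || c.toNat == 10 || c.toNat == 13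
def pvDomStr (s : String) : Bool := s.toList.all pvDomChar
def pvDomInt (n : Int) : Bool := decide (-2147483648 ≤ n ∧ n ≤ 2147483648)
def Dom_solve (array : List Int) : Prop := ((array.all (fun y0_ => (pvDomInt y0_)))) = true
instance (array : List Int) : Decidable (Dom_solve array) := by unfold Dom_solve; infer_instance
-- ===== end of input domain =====

-- B replaces A's sort + adjacent-gap scan with a one-pass set: gapless iff distinct count = max-min+1.
-- (A also sorts its argument in place; the equivalence proved here is about the return value only — B does not mutate.)

-- ===== PORT A =====
-- the 'for index in range(0, len(array)-1)' loop with its early return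
def solveLoop (s : List Int) : List Int → Bool
  | [] => true
  | i :: rest =>
    if ((PySem.List.pyGetD s i 0) - (PySem.List.pyGetD s (i + 1) 0)).natAbs > 1 then false
    else solveLoop s rest

def solve (array : List Int) : Bool :=
  if array.length == 1 then true
  else
    let s := PySem.List.sorted array (fun y => y) false
    solveLoop s (PySem.List.pyRange 0 ((array.length : Int) - 1) 1)

-- ===== PORT B =====
def solve_alt (array : List Int) : Bool :=
  if array.isEmpty then true
  else
    let vs := PySem.Set.ofList array
    decide ((vs.length : Int) =
      (PySem.List.max? vs (fun y => y)).getD 0 - (PySem.List.min? vs (fun y => y)).getD 0 + 1)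

-- ===== PRECONDITION & SPEC =====
def Spec_solve (array : List Int) (out : Bool) : Prop := out = solve_alt array
instance (array : List Int) (out : Bool) : Decidable (Spec_solve array out) := by unfold Spec_solve; infer_instance

-- ===== CLAIM (what is proved, stated in full; the proofs are below) =====
def Claim_equal_solve : Prop := ∀ (array : List Int), Dom_solve array → Spec_solve array (solve array)

-- ===== LEMMAS AND PROOFS =====

-- B's extrema, named for the proofs
def loB (array : List Int) : Int := (PySem.List.min? (PySem.Set.ofList array) (fun y => y)).getD 0
def hiB (array : List Int) : Int := (PySem.List.max? (PySem.Set.ofList array) (fun y => y)).getD 0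

lemma loB_spec (array : List Int) (h : array ≠ []) :
    loB array ∈ array ∧ ∀ y ∈ array, loB array ≤ y := by
  have hne : PySem.Set.ofList array ≠ [] := by
    rcases List.exists_mem_of_ne_nil array h with ⟨x, hx⟩
    intro hnil
    have : x ∈ PySem.Set.ofList array := (PySem.Set.mem_ofList _ _).mpr hx
    simp [hnil] at this
  have hopt : PySem.List.min? (PySem.Set.ofList array) (fun y : Int => y) ≠ none :=
    fun hcontra => hne ((PySem.List.min?_eq_none_iff _ _).mp hcontra)
  rcases Option.ne_none_iff_exists'.mp hopt with ⟨m, hm⟩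
  have hmem := PySem.List.min?_mem hm
  have hmin := PySem.List.min?_isMin hm
  constructor
  · simpa [loB, hm] using (PySem.Set.mem_ofList _ _).mp hmem
  · intro y hy
    have := hmin y ((PySem.Set.mem_ofList _ _).mpr hy)
    simpa [loB, hm] using this

lemma hiB_spec (array : List Int) (h : array ≠ []) :
    hiB array ∈ array ∧ ∀ y ∈ array, y ≤ hiB array := by
  have hne : PySem.Set.ofList array ≠ [] := by
    rcases List.exists_mem_of_ne_nil array h with ⟨x, hx⟩
    intro hnil
    have : x ∈ PySem.Set.ofList array := (PySem.Set.mem_ofList _ _).mpr hx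
    simp [hnil] at this
  have hopt : PySem.List.max? (PySem.Set.ofList array) (fun y : Int => y) ≠ none :=
    fun hcontra => hne ((PySem.List.max?_eq_none_iff _ _).mp hcontra)
  rcases Option.ne_none_iff_exists'.mp hopt with ⟨m, hm⟩
  have hmem := PySem.List.max?_mem hm
  have hmax := PySem.List.max?_isMax hm
  constructor
  · simpa [hiB, hm] using (PySem.Set.mem_ofList _ _).mp hmem
  · intro y hy
    have := hmax y ((PySem.Set.mem_ofList _ _).mpr hy)
    simpa [hiB, hm] using this

-- distinct count of a list as a Finset card
lemma ofList_length_eq_card (array : List Int) :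
    (PySem.Set.ofList array).length = array.toFinset.card := by
  have hnd : (PySem.Set.ofList array).Nodup := PySem.Set.nodup_ofList array
  have hfin : (PySem.Set.ofList array).toFinset = array.toFinset := by
    ext x
    simp [PySem.Set.mem_ofList]
  rw [← hfin, List.toFinset_card_of_nodup hnd]

-- B's value characterised: all integers between min and max occur
lemma B_char (array : List Int) (h : array ≠ []) :
    solve_alt array = true ↔ ∀ k, loB array ≤ k → k ≤ hiB array → k ∈ array := by
  obtain ⟨hlo_mem, hlo_min⟩ := loB_spec array h
  obtain ⟨hhi_mem, hhi_max⟩ := hiB_spec array h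
  have hle : loB array ≤ hiB array := hlo_min _ hhi_mem
  have hsub : array.toFinset ⊆ Finset.Icc (loB array) (hiB array) := by
    intro x hx
    rw [List.mem_toFinset] at hx
    exact Finset.mem_Icc.mpr ⟨hlo_min x hx, hhi_max x hx⟩
  have hcard : ((Finset.Icc (loB array) (hiB array)).card : Int)
      = hiB array - loB array + 1 := by
    rw [Int.card_Icc]
    omega
  constructor
  · intro hb k hk1 hk2
    have hb' : ((PySem.Set.ofList array).length : Int)
        = hiB array - loB array + 1 := by
      simpa [solve_alt, h, loB, hiB] using hb
    rw [ofList_length_eq_card] at hb'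
    have hcards : (Finset.Icc (loB array) (hiB array)).card ≤ array.toFinset.card := by
      omega
    have heq := Finset.eq_of_subset_of_card_le hsub hcards
    have : k ∈ array.toFinset := by
      rw [heq]; exact Finset.mem_Icc.mpr ⟨hk1, hk2⟩
    exact List.mem_toFinset.mp this
  · intro hall
    have hsub2 : Finset.Icc (loB array) (hiB array) ⊆ array.toFinset := by
      intro k hk
      rcases Finset.mem_Icc.mp hk with ⟨h1, h2⟩
      exact List.mem_toFinset.mpr (hall k h1 h2)
    have heq := Finset.Subset.antisymm hsub hsub2
    have : ((PySem.Set.ofList array).length : Int) = hiB array - loB array + 1 := by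
      rw [ofList_length_eq_card, heq, hcard]
    simpa [solve_alt, h, loB, hiB] using this

-- last element of a ≤-sorted list is maximal
lemma le_getLast_of_pairwise : ∀ (l : List Int) (_hp : l.Pairwise (· ≤ ·)) (hne : l ≠ []),
    ∀ y ∈ l, y ≤ l.getLast hne := by
  intro l
  induction l with
  | nil => intro _ hne; exact absurd rfl hne
  | cons a t ih =>
    intro hp hne y hy
    rcases List.pairwise_cons.mp hp with ⟨ha, ht⟩
    cases t with
    | nil => simp at hy; simp [hy]
    | cons b t' =>
      rw [List.getLast_cons (by simp)]
      rcases List.mem_cons.mp hy with rfl | hy'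
      · exact le_trans (ha b (by simp)) (ih ht (by simp) b (by simp))
      · exact ih ht (by simp) y hy'

-- core: on a ≤-sorted nonempty list, adjacent gaps ≤ 1 ↔ every value between head and last occurs
lemma chain_iff_all_mem : ∀ (t : List Int) (a : Int), (a :: t).Pairwise (· ≤ ·) →
    (List.IsChain (fun x y => y ≤ x + 1) (a :: t) ↔
      ∀ k, a ≤ k → k ≤ (a :: t).getLast (by simp) → k ∈ a :: t) := by
  intro t
  induction t with
  | nil =>
    intro a _
    constructor
    · intro _ k h1 h2
      simp at h2
      have : k = a := le_antisymm h2 h1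
      simp [this]
    · intro _; exact List.isChain_singleton a
  | cons b t' ih =>
    intro a hp
    rcases List.pairwise_cons.mp hp with ⟨hab, hbt⟩
    have hab' : a ≤ b := hab b (by simp)
    have hmin_bt : ∀ y ∈ b :: t', b ≤ y := by
      intro y hy
      rcases List.mem_cons.mp hy with rfl | hy'
      · exact le_refl _
      · exact (List.pairwise_cons.mp hbt).1 y hy'
    have hlast : (a :: b :: t').getLast (by simp) = (b :: t').getLast (by simp) := by
      rw [List.getLast_cons (by simp)]
    have hblast : b ≤ (b :: t').getLast (by simp) :=
      le_getLast_of_pairwise _ hbt (by simp) b (by simp)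
    have ihb := ih b hbt
    constructor
    · intro hc k h1 h2
      rcases List.isChain_cons_cons.mp hc with ⟨hba, hc'⟩
      by_cases hka : k ≤ a
      · have : k = a := le_antisymm hka h1
        simp [this]
      · push_neg at hka
        have hbk : b ≤ k := by omega
        have := (ihb.mp hc') k hbk (by rwa [hlast] at h2)
        exact List.mem_cons_of_mem a this
    · intro hall
      rw [List.isChain_cons_cons]
      constructor
      · by_contra hgt
        push_neg at hgt
        have h1 : a ≤ a + 1 := by omega
        have h2 : a + 1 ≤ (a :: b :: t').getLast (by simp) := by
          rw [hlast]; omega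
        have := hall (a + 1) h1 h2
        rcases List.mem_cons.mp this with heq | hmem
        · omega
        · have := hmin_bt _ hmem
          omega
      · apply ihb.mpr
        intro k hk1 hk2
        have := hall k (le_trans hab' hk1) (by rwa [hlast])
        rcases List.mem_cons.mp this with rfl | hmem
        · exact List.mem_cons.mpr (Or.inl (le_antisymm hab' hk1))
        · exact hmem

-- loop characterisation: early-exit scan = all indices pass
lemma solveLoop_iff (s : List Int) : ∀ (l : List Int),
    solveLoop s l = true ↔
      ∀ i ∈ l, ((PySem.List.pyGetD s i 0) - (PySem.List.pyGetD s (i + 1) 0)).natAbs ≤ 1 := by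
  intro l
  induction l with
  | nil => simp [solveLoop]
  | cons i rest ih =>
    simp only [solveLoop]
    split_ifs with hgt
    · simp only [false_iff]
      intro hall
      exact absurd (hall i (by simp)) (by omega)
    · rw [ih]
      constructor
      · intro hall j hj
        rcases List.mem_cons.mp hj with rfl | hj'
        · omega
        · exact hall j hj'
      · intro hall j hj
        exact hall j (List.mem_cons_of_mem i hj)

lemma A_char (array : List Int) (h : array ≠ []) :
    solve array = true ↔ ∀ k, loB array ≤ k → k ≤ hiB array → k ∈ array := by
  obtain ⟨hlo_mem, hlo_min⟩ := loB_spec array h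
  obtain ⟨hhi_mem, hhi_max⟩ := hiB_spec array h
  have hperm : (PySem.List.sorted array (fun y => y) false).Perm array :=
    PySem.List.sorted_perm array (fun y => y) false
  have hpw0 : (PySem.List.sorted array (fun y => y) false).Pairwise
      (fun x y => (fun y => y) x ≤ (fun y => y) y) :=
    PySem.List.sorted_pairwise array (fun y => y)
  have hlen : (PySem.List.sorted array (fun y => y) false).length = array.length :=
    hperm.length_eq
  have htne : (PySem.List.sorted array (fun y => y) false) ≠ [] := by
    intro hnil; rw [hnil] at hlen
    exact h (List.eq_nil_of_length_eq_zero hlen.symm)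
  obtain ⟨a, tt, htt⟩ := List.exists_cons_of_ne_nil htne
  rw [htt] at hperm hlen
  have hpw : (a :: tt).Pairwise (· ≤ ·) := by
    rw [htt] at hpw0; exact hpw0
  have hmem : ∀ x, x ∈ (a :: tt) ↔ x ∈ array := fun x => hperm.mem_iff
  -- head of sorted = loB, last = hiB
  have hheadmin : ∀ y ∈ array, a ≤ y := by
    intro y hy
    rcases List.mem_cons.mp ((hmem y).mpr hy) with rfl | hy'
    · exact le_refl _
    · exact (List.pairwise_cons.mp hpw).1 y hy'
  have hhead_lo : a = loB array := by
    have h1 : loB array ≤ a := hlo_min a ((hmem a).mp (by simp))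
    have h2 : a ≤ loB array := hheadmin _ hlo_mem
    omega
  have hlastmax : ∀ y ∈ (a :: tt), y ≤ (a :: tt).getLast (by simp) :=
    le_getLast_of_pairwise _ hpw (by simp)
  have hlast_hi : (a :: tt).getLast (by simp) = hiB array := by
    have hin : (a :: tt).getLast (by simp) ∈ (a :: tt) := List.getLast_mem _
    have h1 : (a :: tt).getLast (by simp) ≤ hiB array := hhi_max _ ((hmem _).mp hin)
    have h2 : hiB array ≤ (a :: tt).getLast (by simp) := hlastmax _ ((hmem _).mpr hhi_mem)
    omega
  -- reduce solve to the chain property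
  have hsolve : solve array = true ↔ List.IsChain (fun x y => y ≤ x + 1) (a :: tt) := by
    by_cases h1 : array.length = 1
    · have htt' : tt = [] := by
        rw [h1] at hlen; simpa using hlen
      subst htt'
      simp only [solve, h1]
      simp
    · have hsl : solve array
          = solveLoop (a :: tt) (PySem.List.pyRange 0 ((array.length : Int) - 1) 1) := by
        simp only [solve, htt]
        rw [if_neg (by simpa using h1)]
      rw [hsl, solveLoop_iff]
      constructor
      · intro hall
        rw [List.isChain_iff_getElem]
        intro i hi
        have hi' : (i : Int) < (array.length : Int) - 1 := by
          have hlen' : (a :: tt).length = array.length := hlen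
          simp only [List.length_cons] at hi hlen'
          omega
        have hmemr : (i : Int) ∈ PySem.List.pyRange 0 ((array.length : Int) - 1) 1 := by
          rw [PySem.List.mem_pyRange_one]
          exact ⟨Int.ofNat_nonneg i, hi'⟩
        have hcheck := hall _ hmemr
        have e1 : PySem.List.pyGetD (a :: tt) ((i : Int)) 0 = (a :: tt)[i] := by
          rw [PySem.List.pyGetD_natCast]
          exact List.getD_eq_getElem _ _ (by omega)
        have e2 : PySem.List.pyGetD (a :: tt) ((i : Int) + 1) 0 = (a :: tt)[i + 1] := by
          have hcast : ((i : Int) + 1) = ((i + 1 : Nat) : Int) := by push_cast; ring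
          rw [hcast, PySem.List.pyGetD_natCast]
          exact List.getD_eq_getElem _ _ (by omega)
        rw [e1, e2] at hcheck
        have hle : (a :: tt)[i] ≤ (a :: tt)[i + 1] :=
          List.pairwise_iff_getElem.mp hpw i (i + 1) (by omega) (by omega) (by omega)
        omega
      · intro hc j hj
        rw [PySem.List.mem_pyRange_one] at hj
        obtain ⟨hj0, hj1⟩ := hj
        obtain ⟨i, rfl⟩ := Int.eq_ofNat_of_zero_le hj0
        have hi : i + 1 < (a :: tt).length := by
          rw [hlen]
          omega
        have e1 : PySem.List.pyGetD (a :: tt) ((i : Int)) 0 = (a :: tt)[i] := by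
          rw [PySem.List.pyGetD_natCast]
          exact List.getD_eq_getElem _ _ (by omega)
        have e2 : PySem.List.pyGetD (a :: tt) ((i : Int) + 1) 0 = (a :: tt)[i + 1] := by
          have hcast : ((i : Int) + 1) = ((i + 1 : Nat) : Int) := by push_cast; ring
          rw [hcast, PySem.List.pyGetD_natCast]
          exact List.getD_eq_getElem _ _ (by omega)
        rw [e1, e2]
        have hgap := List.isChain_iff_getElem.mp hc i (by omega)
        have hle : (a :: tt)[i] ≤ (a :: tt)[i + 1] :=
          List.pairwise_iff_getElem.mp hpw i (i + 1) (by omega) (by omega) (by omega)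
        omega
  rw [hsolve, chain_iff_all_mem tt a hpw]
  constructor
  · intro hall k h1 h2
    rw [← hhead_lo] at h1
    rw [← hlast_hi] at h2
    exact (hmem k).mp (hall k h1 h2)
  · intro hall k h1 h2
    rw [hhead_lo] at h1
    rw [hlast_hi] at h2
    exact (hmem k).mpr (hall k h1 h2)

-- ===== VERDICT (by name: the statement is the Claim_ definition above) =====
theorem solve_spec : Claim_equal_solve := by
  intro array _
  unfold Spec_solve
  rcases eq_or_ne array [] with rfl | h
  · rfl
  · have := (A_char array h).trans (B_char array h).symm
    cases ha : solve array <;> cases hb : solve_alt array <;> simp_all
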